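-- pv_equiv track=rewrite | github.com/nath162/A-pathfinding-algo | algo.py | trouvermeilleurchemin
-- ===== SOURCE A (Python) =====
-- def trouvermeilleurchemin(grid,seta):
--     chemin = dict()
--     while seta != {}:
--         minv = None
--         mink = None
--         for i in seta.copy().keys():
--             if minv == None or seta[i] < minv:
--                 minv = seta[i]
--                 mink = i
--         seta.pop(mink)
--         chemin[mink] = minv
--         for i in seta.copy().keys():
--             if seta[i] == minv:
--                 seta.pop(i)
--     return chemin
-- ===== SOURCE B (Python) =====
-- def trouvermeilleurchemin(grid, seta):
--     # one pass: first key seen for each distinct value, then values ascending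
--     first = {}
--     for k, v in seta.items():
--         if v not in first:
--             first[v] = k
--     return {first[v]: v for v in sorted(first)}
-- ===== Notes on version B (the rewrite author's own statement) =====
-- stated objective: faster
-- what changed: A repeatedly scans the remaining dict for the minimum value and purges equal values (selection-sort style); B makes one grouping pass recording the first key per distinct value, then sorts the distinct values ascending.
import Mathlib
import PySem

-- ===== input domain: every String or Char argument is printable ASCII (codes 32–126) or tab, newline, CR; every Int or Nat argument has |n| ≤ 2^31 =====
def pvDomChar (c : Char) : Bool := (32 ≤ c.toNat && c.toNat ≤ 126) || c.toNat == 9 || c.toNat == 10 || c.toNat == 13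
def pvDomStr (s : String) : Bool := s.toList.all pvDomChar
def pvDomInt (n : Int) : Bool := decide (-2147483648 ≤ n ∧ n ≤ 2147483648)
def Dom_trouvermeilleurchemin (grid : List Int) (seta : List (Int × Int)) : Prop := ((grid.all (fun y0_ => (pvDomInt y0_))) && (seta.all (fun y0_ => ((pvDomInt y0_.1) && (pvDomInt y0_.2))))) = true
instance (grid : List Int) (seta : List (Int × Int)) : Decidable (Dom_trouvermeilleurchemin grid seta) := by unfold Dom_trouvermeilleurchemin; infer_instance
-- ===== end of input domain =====

-- B replaces A's repeated select-min-and-purge scans by one grouping pass (first key per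
-- distinct value) followed by a sort of the distinct values. Python's A empties its dict
-- argument `seta` in place; B does not mutate it — the equivalence proved is about the
-- RETURN value only.

-- ===== PORT A =====
-- inner scan: `minv = None; mink = None; for i in seta.copy().keys(): if minv == None or seta[i] < minv: ...`
def pvMinKV (seta : PySem.Dict Int Int) : Option Int × Option Int :=
  seta.keys.foldl (fun acc i =>
    match acc.1 with
    | none => (some (seta.getD i 0), some i)
    | some mv => if seta.getD i 0 < mv then (some (seta.getD i 0), some i) else acc)
    (none, none)

-- the `while seta != {}` loop; the fuel only makes the recursion structural (each pass pops ≥ 1 key)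
def pvLoopA (fuel : Nat) (seta chemin : PySem.Dict Int Int) : PySem.Dict Int Int :=
  match fuel with
  | 0 => chemin
  | fuel' + 1 =>
    if seta.size = 0 then chemin else
    match pvMinKV seta with
    | (some minv, some mink) =>
        let seta1 := seta.erase mink                      -- seta.pop(mink)
        let chemin1 := chemin.insert mink minv            -- chemin[mink] = minv
        -- `for i in seta.copy().keys(): if seta[i] == minv: seta.pop(i)` (i is always still present)
        let seta2 := seta1.keys.foldl
          (fun d i => if d.get? i == some minv then d.erase i else d) seta1
        pvLoopA fuel' seta2 chemin1
    | _ => chemin                                          -- unreachable: seta is nonempty here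

def trouvermeilleurchemin (grid : List Int) (seta : List (Int × Int)) : List (Int × Int) :=
  let d := PySem.Dict.ofList seta
  (pvLoopA d.size d PySem.Dict.empty).items

-- ===== PORT B =====
def trouvermeilleurchemin_alt (grid : List Int) (seta : List (Int × Int)) : List (Int × Int) :=
  let d := PySem.Dict.ofList seta
  -- first = {}; for k, v in seta.items(): if v not in first: first[v] = k
  let first := d.items.foldl
    (fun (f : PySem.Dict Int Int) kv => if f.contains kv.2 then f else f.insert kv.2 kv.1)
    PySem.Dict.empty
  -- {first[v]: v for v in sorted(first)}
  (PySem.List.sorted first.keys (fun v => v) false).map (fun v => (first.getD v 0, v))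

-- ===== PRECONDITION & SPEC =====
def Spec_trouvermeilleurchemin (grid : List Int) (seta : List (Int × Int)) (out : List (Int × Int)) : Prop := out = trouvermeilleurchemin_alt grid seta
instance (grid : List Int) (seta : List (Int × Int)) (out : List (Int × Int)) : Decidable (Spec_trouvermeilleurchemin grid seta out) := by unfold Spec_trouvermeilleurchemin; infer_instance

-- ===== CLAIM (what is proved, stated in full; the proofs are below) =====
def Claim_equal_trouvermeilleurchemin : Prop := ∀ (grid : List Int) (seta : List (Int × Int)), Dom_trouvermeilleurchemin grid seta → Spec_trouvermeilleurchemin grid seta (trouvermeilleurchemin grid seta)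

-- ===== LEMMAS AND PROOFS =====

theorem pvLenFilterLt (l : List (Int × Int)) (p : Int × Int → Bool) (x : Int × Int)
    (hx : x ∈ l) (h : ¬ p x) : (l.filter p).length < l.length := by
  rw [List.length_filter_lt_length_iff_exists]
  exact ⟨x, hx, by simpa using h⟩

-- selection fold over the remaining pairs (state = current best pair)
def pvSelAux (b : Int × Int) (l : List (Int × Int)) : Int × Int :=
  l.foldl (fun best kv => if kv.2 < best.2 then kv else best) b

theorem pvSelAux_mem (l : List (Int × Int)) (b : Int × Int) : pvSelAux b l ∈ b :: l := by
  induction l generalizing b with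
  | nil => simp [pvSelAux]
  | cons q t ih =>
    have h := ih (if q.2 < b.2 then q else b)
    simp only [pvSelAux, List.foldl_cons] at *
    rcases List.mem_cons.mp h with h' | h'
    · rw [h']; split <;> simp
    · simp [h']

theorem pvSelAux_le (l : List (Int × Int)) (b : Int × Int) :
    ∀ p ∈ b :: l, (pvSelAux b l).2 ≤ p.2 := by
  induction l generalizing b with
  | nil => simp [pvSelAux]
  | cons q t ih =>
    intro p hp
    have hstep : pvSelAux b (q :: t) = pvSelAux (if q.2 < b.2 then q else b) t := by
      simp [pvSelAux]
    rw [hstep]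
    by_cases h : q.2 < b.2 <;> simp only [h, if_true, if_false, reduceIte] <;>
    [have hself : (pvSelAux q t).2 ≤ q.2 := ih _ _ (by simp);
     have hself : (pvSelAux b t).2 ≤ b.2 := ih _ _ (by simp)] <;>
    (rcases List.mem_cons.mp hp with rfl | hp'
     · omega
     · rcases List.mem_cons.mp hp' with rfl | hp''
       · omega
       · exact ih _ p (by simp [hp'']))

theorem pvSelAux_find (l : List (Int × Int)) (b : Int × Int) :
    (b :: l).find? (fun p => p.2 == (pvSelAux b l).2) = some (pvSelAux b l) := by
  induction l generalizing b with
  | nil => simp [pvSelAux]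
  | cons q t ih =>
    have hstep : pvSelAux b (q :: t) = pvSelAux (if q.2 < b.2 then q else b) t := by
      simp [pvSelAux]
    by_cases h : q.2 < b.2
    · rw [hstep, if_pos h]
      have hle : (pvSelAux q t).2 ≤ q.2 := pvSelAux_le t q _ (by simp)
      rw [List.find?_cons_of_neg (by simp; omega)]
      exact ih q
    · rw [hstep, if_neg h]
      have hle : (pvSelAux b t).2 ≤ b.2 := pvSelAux_le t b _ (by simp)
      have ihb := ih b
      by_cases hbe : b.2 = (pvSelAux b t).2
      · have h1 : (List.find? (fun p => p.2 == (pvSelAux b t).2) (b :: t)) = some b :=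
          List.find?_cons_of_pos (by simp [hbe])
        rw [h1] at ihb
        have hb : pvSelAux b t = b := by injection ihb with h'; exact h'.symm
        rw [hb] at *
        exact List.find?_cons_of_pos (by simp)
      · rw [List.find?_cons_of_neg (by simp; omega), List.find?_cons_of_neg (by simp; omega)]
        rw [List.find?_cons_of_neg (by simp; omega)] at ihb
        exact ihb

-- list-level picture of A: pop the first minimal-value pair, drop all pairs of that value, repeat
def pvCore : List (Int × Int) → List (Int × Int)
  | [] => []
  | b :: t =>
    let r := pvSelAux b t
    r :: pvCore ((b :: t).filter (fun p => p.2 ≠ r.2))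
  termination_by l => l.length
  decreasing_by
    exact pvLenFilterLt _ _ _ (pvSelAux_mem t b) (by simp)

theorem pvCore_cons (b : Int × Int) (t : List (Int × Int)) :
    pvCore (b :: t) =
      pvSelAux b t :: pvCore ((b :: t).filter (fun p => p.2 ≠ (pvSelAux b t).2)) := by
  rw [pvCore]

-- list-level picture of B's grouping pass: first key per value not yet seen
def pvBspec (seen : List Int) : List (Int × Int) → List (Int × Int)
  | [] => []
  | (k, v) :: t => if v ∈ seen then pvBspec seen t else (v, k) :: pvBspec (v :: seen) t

theorem pvMinKV_fold_items (seta : PySem.Dict Int Int) (hnd : seta.keys.Nodup) :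
    pvMinKV seta = seta.items.foldl (fun acc kv =>
      match acc.1 with
      | none => (some kv.2, some kv.1)
      | some mv => if kv.2 < mv then (some kv.2, some kv.1) else acc) (none, none) := by
  conv_rhs => rw [PySem.Dict.items_eq_map_keys seta hnd 0]
  rw [List.foldl_map]
  rfl

theorem pvSelAux_state (t : List (Int × Int)) (b : Int × Int) :
    t.foldl (fun acc kv =>
      match acc.1 with
      | none => (some kv.2, some kv.1)
      | some mv => if kv.2 < mv then (some kv.2, some kv.1) else acc)
      ((some b.2 : Option Int), (some b.1 : Option Int))
    = (some (pvSelAux b t).2, some (pvSelAux b t).1) := by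
  induction t generalizing b with
  | nil => rfl
  | cons q t ih =>
    simp only [List.foldl_cons, pvSelAux]
    by_cases h : q.2 < b.2
    · simp only [h, if_pos, reduceIte]
      exact ih q
    · simp only [h, reduceIte]
      exact ih b

theorem pvMinKV_mk_cons (b : Int × Int) (t : List (Int × Int))
    (hnd : ((b :: t).map Prod.fst).Nodup) :
    pvMinKV (PySem.Dict.mk (b :: t)) =
      (some (pvSelAux b t).2, some (pvSelAux b t).1) := by
  rw [pvMinKV_fold_items _ (by simpa [PySem.Dict.keys] using hnd)]
  simp only [List.foldl_cons]
  exact pvSelAux_state t b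

theorem pvBspec_congr (s s' : List Int) (l : List (Int × Int))
    (h : ∀ x : Int, x ∈ s ↔ x ∈ s') : pvBspec s l = pvBspec s' l := by
  induction l generalizing s s' with
  | nil => rfl
  | cons q t ih =>
    obtain ⟨k, v⟩ := q
    simp only [pvBspec]
    by_cases hv : v ∈ s
    · rw [if_pos hv, if_pos ((h v).mp hv)]; exact ih s s' h
    · rw [if_neg hv, if_neg (fun c => hv ((h v).mpr c))]
      congr 1
      exact ih _ _ (fun x => by simp [h x])

theorem pvBspec_mem (l : List (Int × Int)) (seen : List Int) (p : Int × Int)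
    (hp : p ∈ pvBspec seen l) : (p.2, p.1) ∈ l ∧ p.1 ∉ seen := by
  induction l generalizing seen with
  | nil => simp [pvBspec] at hp
  | cons q t ih =>
    obtain ⟨k, v⟩ := q
    simp only [pvBspec] at hp
    by_cases hv : v ∈ seen
    · rw [if_pos hv] at hp
      have := ih seen hp
      exact ⟨List.mem_cons_of_mem _ this.1, this.2⟩
    · rw [if_neg hv] at hp
      rcases List.mem_cons.mp hp with rfl | hp'
      · exact ⟨by simp, hv⟩
      · have := ih (v :: seen) hp'
        exact ⟨List.mem_cons_of_mem _ this.1, fun c => this.2 (List.mem_cons_of_mem _ c)⟩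

theorem pvBspec_nodup (l : List (Int × Int)) (seen : List Int) :
    ((pvBspec seen l).map Prod.fst).Nodup := by
  induction l generalizing seen with
  | nil => simp [pvBspec]
  | cons q t ih =>
    obtain ⟨k, v⟩ := q
    simp only [pvBspec]
    by_cases hv : v ∈ seen
    · rw [if_pos hv]; exact ih seen
    · rw [if_neg hv]
      simp only [List.map_cons, List.nodup_cons]
      refine ⟨?_, ih (v :: seen)⟩
      intro hc
      rcases List.mem_map.mp hc with ⟨p, hp, hpe⟩
      have := (pvBspec_mem t (v :: seen) p hp).2
      exact this (by simp [hpe])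

theorem pvBspec_filter_of_mem (l : List (Int × Int)) (seen : List Int) (m : Int)
    (hm : m ∈ seen) :
    pvBspec seen (l.filter (fun p => p.2 ≠ m)) = pvBspec seen l := by
  induction l generalizing seen with
  | nil => rfl
  | cons q t ih =>
    obtain ⟨k, v⟩ := q
    by_cases hvm : v = m
    · subst hvm
      rw [List.filter_cons_of_neg (by simp)]
      rw [ih seen hm]
      simp only [pvBspec, if_pos hm]
    · rw [List.filter_cons_of_pos (by simp [hvm])]
      simp only [pvBspec]
      by_cases hv : v ∈ seen
      · rw [if_pos hv, if_pos hv]; exact ih seen hm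
      · rw [if_neg hv, if_neg hv]
        congr 1
        exact ih (v :: seen) (List.mem_cons_of_mem _ hm)

theorem pvBspec_cons_seen (l : List (Int × Int)) (seen : List Int) (m : Int)
    (hm : ∀ p ∈ l, p.2 ≠ m) :
    pvBspec (m :: seen) l = pvBspec seen l := by
  induction l generalizing seen with
  | nil => rfl
  | cons q t ih =>
    obtain ⟨k, v⟩ := q
    have hv : v ≠ m := hm (k, v) (by simp)
    have ht : ∀ p ∈ t, p.2 ≠ m := fun p hp => hm p (List.mem_cons_of_mem _ hp)
    simp only [pvBspec]
    by_cases hs : v ∈ seen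
    · rw [if_pos (List.mem_cons_of_mem _ hs), if_pos hs]
      exact ih seen ht
    · rw [if_neg (by intro hc; rcases List.mem_cons.mp hc with h | h; exact hv h; exact hs h),
          if_neg hs]
      congr 1
      calc pvBspec (v :: m :: seen) t = pvBspec (m :: v :: seen) t :=
            pvBspec_congr _ _ t (by intro x; simp; tauto)
        _ = pvBspec (v :: seen) t := ih (v :: seen) ht

theorem pvBspec_extract (l : List (Int × Int)) (seen : List Int) (m k : Int)
    (hm : m ∉ seen) (hfind : l.find? (fun p => p.2 == m) = some (k, m)) :
    (pvBspec seen l).Perm ((m, k) :: pvBspec seen (l.filter (fun p => p.2 ≠ m))) := by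
  induction l generalizing seen with
  | nil => simp at hfind
  | cons q t ih =>
    obtain ⟨k', v⟩ := q
    by_cases hvm : v = m
    · subst hvm
      rw [List.find?_cons_of_pos (by simp)] at hfind
      have hk : k' = k := by simpa using hfind
      subst hk
      rw [List.filter_cons_of_neg (by simp)]
      simp only [pvBspec, if_neg hm]
      refine List.Perm.cons _ ?_
      have h1 : pvBspec (v :: seen) t = pvBspec (v :: seen) (t.filter (fun p => p.2 ≠ v)) :=
        (pvBspec_filter_of_mem t (v :: seen) v (by simp)).symm
      have h2 : pvBspec (v :: seen) (t.filter (fun p => p.2 ≠ v))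
          = pvBspec seen (t.filter (fun p => p.2 ≠ v)) :=
        pvBspec_cons_seen _ seen v (by intro p hp; simpa using (List.mem_filter.mp hp).2)
      rw [h1, h2]
    · rw [List.find?_cons_of_neg (by simp [hvm])] at hfind
      rw [List.filter_cons_of_pos (by simp [hvm])]
      simp only [pvBspec]
      by_cases hs : v ∈ seen
      · rw [if_pos hs, if_pos hs]
        exact ih seen hm hfind
      · rw [if_neg hs, if_neg hs]
        have hperm := ih (v :: seen)
          (by intro hc; rcases List.mem_cons.mp hc with h | h; exact hvm h.symm; exact hm h) hfind
        exact (hperm.cons _).trans (List.Perm.swap _ _ _)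


theorem pvPurge_foldl (ks : List Int) (m : Int) (l : List (Int × Int))
    (hnd : (l.map Prod.fst).Nodup) :
    (ks.foldl (fun (e : PySem.Dict Int Int) i =>
        if e.get? i == some m then e.erase i else e) (PySem.Dict.mk l)).items
      = l.filter (fun p => !(decide (p.1 ∈ ks) && p.2 == m)) := by
  induction ks generalizing l with
  | nil => simp
  | cons i ks ih =>
    simp only [List.foldl_cons]
    have hkeys : (PySem.Dict.mk l).keys.Nodup := by simpa [PySem.Dict.keys] using hnd
    by_cases hc : (PySem.Dict.mk l).get? i = some m
    · rw [if_pos (by simp [hc])]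
      have herase : ((PySem.Dict.mk l).erase i) = PySem.Dict.mk (l.filter (fun p => !(p.1 == i))) := by
        simp [PySem.Dict.erase]
      rw [herase, ih _ (by
        refine List.Nodup.sublist ?_ hnd
        exact List.Sublist.map _ List.filter_sublist)]
      rw [List.filter_filter]
      apply List.filter_congr
      intro p hp
      have him : (i, m) ∈ l := PySem.Dict.mem_items_of_get?_eq_some (PySem.Dict.mk l) hc
      by_cases hpi : p.1 = i
      · -- p and (i,m) share key i; nodup keys forces p = (i,m)
        have : p = (i, m) := by
          have h1 : p.1 = (i, m).1 := hpi
          exact List.inj_on_of_nodup_map hnd hp him h1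
        simp [this]
      · simp [hpi]
    · rw [if_neg (by simpa using hc)]
      rw [ih _ hnd]
      apply List.filter_congr
      intro p hp
      by_cases hpi : p.1 = i
      · -- key i's (unique) pair in l is p, and get? i ≠ some m, so p.2 ≠ m
        have hget : (PySem.Dict.mk l).get? p.1 = some p.2 :=
          PySem.Dict.get?_of_mem_items (PySem.Dict.mk l) (by simpa using hp) hkeys
        rw [hpi] at hget
        have hpm : p.2 ≠ m := by intro h; rw [h] at hget; exact hc hget
        simp [hpi, hpm]
      · simp [hpi]

theorem pvFirst_items (l : List (Int × Int)) (acc : PySem.Dict Int Int) :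
    (l.foldl (fun (f : PySem.Dict Int Int) kv =>
        if f.contains kv.2 then f else f.insert kv.2 kv.1) acc).items
      = acc.items ++ pvBspec acc.keys l := by
  induction l generalizing acc with
  | nil => simp [pvBspec]
  | cons q t ih =>
    obtain ⟨k, v⟩ := q
    simp only [List.foldl_cons]
    by_cases hc : acc.contains v
    · rw [if_pos hc, ih acc]
      have hv : v ∈ acc.keys := (PySem.Dict.contains_iff_mem_keys ..).mp hc
      simp [pvBspec, hv]
    · rw [if_neg (by simpa using hc), ih _]
      have hv : v ∉ acc.keys := fun h => hc ((PySem.Dict.contains_iff_mem_keys ..).mpr h)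
      have hitems := PySem.Dict.items_insert_of_not_contains (d := acc) (k := v) (v := k)
        (by simpa using hc)
      have hkeys : (acc.insert v k).keys = acc.keys ++ [v] := by
        simp [PySem.Dict.keys, hitems]
      rw [hitems, hkeys]
      simp only [pvBspec, if_neg hv, List.append_assoc, List.singleton_append]
      congr 2
      exact pvBspec_congr _ _ t (by intro x; simp; tauto)

-- ## A's loop builds chemin.items ++ pvCore l
theorem pvLoopA_items (fuel : Nat) (l : List (Int × Int)) (chemin : PySem.Dict Int Int)
    (hnd : (l.map Prod.fst).Nodup)
    (hdisj : ∀ k ∈ l.map Prod.fst, chemin.contains k = false)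
    (hfuel : l.length ≤ fuel) :
    (pvLoopA fuel (PySem.Dict.mk l) chemin).items = chemin.items ++ pvCore l := by
  induction fuel generalizing l chemin with
  | zero =>
    have : l = [] := List.length_eq_zero_iff.mp (Nat.le_zero.mp hfuel)
    subst this
    simp [pvLoopA, pvCore]
  | succ fuel ih =>
    cases l with
    | nil => simp [pvLoopA, PySem.Dict.size, pvCore]
    | cons b t =>
      have hmem : pvSelAux b t ∈ b :: t := pvSelAux_mem t b
      simp only [pvLoopA, PySem.Dict.size]
      rw [if_neg (by simp)]
      simp only [pvMinKV_mk_cons b t hnd]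
      set r := pvSelAux b t with hr
      -- the erase step
      have herase : (PySem.Dict.mk (b :: t)).erase r.1
          = PySem.Dict.mk ((b :: t).filter (fun p => !(p.1 == r.1))) := by
        simp [PySem.Dict.erase]
      set l1 := (b :: t).filter (fun p => !(p.1 == r.1)) with hl1
      have hnd1 : (l1.map Prod.fst).Nodup :=
        List.Nodup.sublist (List.Sublist.map _ List.filter_sublist) hnd
      -- the purge loop is a filter
      have hpurge : ((PySem.Dict.mk l1).keys.foldl
          (fun (d : PySem.Dict Int Int) i => if d.get? i == some r.2 then d.erase i else d)
          (PySem.Dict.mk l1)).items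
          = (b :: t).filter (fun p => decide (p.2 ≠ r.2)) := by
        have h0 := pvPurge_foldl ((PySem.Dict.mk l1).keys) r.2 l1 hnd1
        rw [h0]
        have h1 : l1.filter (fun p => !(decide (p.1 ∈ (PySem.Dict.mk l1).keys) && p.2 == r.2))
            = l1.filter (fun p => !(p.2 == r.2)) := by
          apply List.filter_congr
          intro p hp
          have hmemk : decide (p.1 ∈ (PySem.Dict.mk l1).keys) = true :=
            decide_eq_true (List.mem_map_of_mem hp)
          rw [hmemk, Bool.true_and]
        rw [h1, hl1, List.filter_filter]
        apply List.filter_congr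
        intro p hp
        by_cases hpv : p.2 = r.2
        · simp [hpv]
        · have hpk : p.1 ≠ r.1 := by
            intro hk
            have : p = r := List.inj_on_of_nodup_map hnd hp hmem hk
            exact hpv (congrArg Prod.snd this)
          simp [hpv, hpk]
      -- the dict after erase+purge IS the value-filtered list
      have hseta2 : ((PySem.Dict.mk (b :: t)).erase r.1).keys.foldl
          (fun (d : PySem.Dict Int Int) i => if d.get? i == some r.2 then d.erase i else d)
          ((PySem.Dict.mk (b :: t)).erase r.1)
          = PySem.Dict.mk ((b :: t).filter (fun p => decide (p.2 ≠ r.2))) := by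
        apply PySem.Dict.ext
        rw [herase]
        exact hpurge
      -- the chemin insert appends
      have hrk : r.1 ∈ (b :: t).map Prod.fst := List.mem_map_of_mem hmem
      have hchem : (chemin.insert r.1 r.2).items = chemin.items ++ [(r.1, r.2)] :=
        PySem.Dict.items_insert_of_not_contains (d := chemin) (k := r.1) (v := r.2)
          (hdisj r.1 hrk)
      set l2 := (b :: t).filter (fun p => decide (p.2 ≠ r.2)) with hl2
      have hnd2 : (l2.map Prod.fst).Nodup :=
        List.Nodup.sublist (List.Sublist.map _ List.filter_sublist) hnd
      have hdisj2 : ∀ k ∈ l2.map Prod.fst, (chemin.insert r.1 r.2).contains k = false := by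
        intro k hk
        rcases List.mem_map.mp hk with ⟨p, hp, rfl⟩
        rcases List.mem_filter.mp hp with ⟨hpl, hpv⟩
        have hne : p.1 ≠ r.1 := by
          intro hkk
          have : p = r := List.inj_on_of_nodup_map hnd hpl hmem hkk
          simp [this] at hpv
        rw [PySem.Dict.contains_insert]
        simp [hne, hdisj p.1 (List.mem_map_of_mem hpl)]
      have hfuel2 : l2.length ≤ fuel := by
        have : l2.length < (b :: t).length :=
          pvLenFilterLt (b :: t) _ r hmem (by simp)
        omega
      rw [hseta2, ih l2 (chemin.insert r.1 r.2) hnd2 hdisj2 hfuel2, hchem, pvCore_cons, ← hr]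
      simp [hl2]

-- ## pvCore: permutation with pvBspec, strictly increasing values
theorem pvCore_props (l : List (Int × Int)) :
    ((pvCore l).map (fun p => (p.2, p.1))).Perm (pvBspec [] l)
      ∧ (pvCore l).Pairwise (fun a b => a.2 < b.2)
      ∧ ∀ p ∈ pvCore l, p.2 ∈ l.map Prod.snd := by
  induction l using pvCore.induct with
  | case1 => simp [pvCore, pvBspec]
  | case2 b t r0 ih =>
    obtain ⟨ihperm, ihpair, ihsub⟩ : _ ∧ _ ∧ _ := ih
    have hmem : pvSelAux b t ∈ b :: t := pvSelAux_mem t b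
    have hle : ∀ p ∈ b :: t, (pvSelAux b t).2 ≤ p.2 := pvSelAux_le t b
    have hfind := pvSelAux_find t b
    set r := pvSelAux b t with hr
    have hcore : pvCore (b :: t) = r :: pvCore ((b :: t).filter (fun p => p.2 ≠ r.2)) :=
      pvCore_cons b t
    set l' := (b :: t).filter (fun p => decide (p.2 ≠ r.2)) with hl'
    have hsubl : ∀ v ∈ l'.map Prod.snd, v ∈ (b :: t).map Prod.snd := fun v hv =>
      (List.Sublist.map Prod.snd (List.filter_sublist (l := b :: t))).mem hv
    have hgt : ∀ v ∈ l'.map Prod.snd, r.2 < v := by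
      intro v hv
      rcases List.mem_map.mp hv with ⟨p, hp, rfl⟩
      rcases List.mem_filter.mp hp with ⟨hpl, hpv⟩
      have h1 := hle p hpl
      have hne : p.2 ≠ r.2 := by simpa using hpv
      omega
    refine ⟨?_, ?_, ?_⟩
    · rw [hcore]
      have hextract := pvBspec_extract (b :: t) [] r.2 r.1 (by simp) hfind
      simp only [List.map_cons]
      exact (ihperm.cons (r.2, r.1)).trans hextract.symm
    · rw [hcore]
      refine List.pairwise_cons.mpr ⟨?_, ihpair⟩
      intro q hq
      exact hgt q.2 (ihsub q hq)
    · rw [hcore]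
      intro p hp
      rcases List.mem_cons.mp hp with rfl | hp'
      · exact List.mem_map_of_mem hmem
      · exact hsubl p.2 (ihsub p hp')

-- ## assembling B's output
theorem pvAlt_eq_core (l : List (Int × Int)) :
    (PySem.List.sorted ((pvBspec [] l).map Prod.fst) (fun v => v) false).map
        (fun v => ((PySem.Dict.mk (pvBspec [] l)).getD v 0, v))
      = pvCore l := by
  obtain ⟨hperm, hpair, hsub⟩ := pvCore_props l
  have hpermkeys : ((pvCore l).map Prod.snd).Perm ((pvBspec [] l).map Prod.fst) := by
    have := hperm.map Prod.fst
    simpa [List.map_map, Function.comp] using this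
  have hlt : ((pvCore l).map Prod.snd).Pairwise (fun a b => a < b) :=
    List.pairwise_map.mpr (by exact hpair)
  have hsorted : PySem.List.sorted ((pvBspec [] l).map Prod.fst) (fun v => v) false
      = (pvCore l).map Prod.snd :=
    PySem.List.sorted_eq_of_perm_of_pairwise_lt _ _ _ hpermkeys hlt
  rw [hsorted, List.map_map]
  have : ∀ p ∈ pvCore l, ((PySem.Dict.mk (pvBspec [] l)).getD p.2 0, p.2) = p := by
    intro p hp
    have hmem : (p.2, p.1) ∈ pvBspec [] l := by
      have : (p.2, p.1) ∈ (pvCore l).map (fun p => (p.2, p.1)) :=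
        List.mem_map_of_mem hp
      exact hperm.subset this
    have hgd : (PySem.Dict.mk (pvBspec [] l)).getD p.2 0 = p.1 :=
      PySem.Dict.getD_of_mem_items (PySem.Dict.mk (pvBspec [] l)) (by simpa using hmem)
        (by simpa [PySem.Dict.keys] using pvBspec_nodup l []) 0
    rw [hgd]
  calc (pvCore l).map (fun p => ((PySem.Dict.mk (pvBspec [] l)).getD p.2 0, p.2))
      = (pvCore l).map id := List.map_congr_left this
    _ = pvCore l := List.map_id _

-- ===== VERDICT (by name: the statement is the Claim_ definition above) =====
theorem trouvermeilleurchemin_spec : Claim_equal_trouvermeilleurchemin := by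
  intro grid seta _
  unfold Spec_trouvermeilleurchemin trouvermeilleurchemin trouvermeilleurchemin_alt
  set d := PySem.Dict.ofList seta with hd
  have hnd : (d.items.map Prod.fst).Nodup := PySem.Dict.nodup_keys_ofList seta
  have hA : (pvLoopA d.size d PySem.Dict.empty).items = pvCore d.items := by
    have := pvLoopA_items d.size d.items PySem.Dict.empty hnd
      (by intro k _; simp [PySem.Dict.contains_empty]) (le_refl _)
    simpa using this
  have hfirst : (d.items.foldl (fun (f : PySem.Dict Int Int) kv =>
      if f.contains kv.2 then f else f.insert kv.2 kv.1) PySem.Dict.empty)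
      = PySem.Dict.mk (pvBspec [] d.items) := by
    apply PySem.Dict.ext
    simpa [PySem.Dict.empty] using pvFirst_items d.items PySem.Dict.empty
  simp only [hA, hfirst]
  exact (pvAlt_eq_core d.items).symm
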